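-- pv_equiv track=rewrite | github.com/Ahlclark07/Projet_Graphe | main.py | definir_matrice_adjacente
-- ===== SOURCE A (Python) =====
-- def definir_matrice_adjacente(sommets):
--     matrice = []
--     for i in range(0, len(sommets)):
--         ligne = []
--         for sommet in sommets:
--             if sommets[i][0] in sommet[2:]:
--                 ligne.append(sommets[i][1])
--             else:
--                 ligne.append("*")
--         matrice.append(ligne)
--     return matrice
-- ===== SOURCE B (Python) =====
-- def definir_matrice_adjacente(sommets):
--     n = len(sommets)
--     matrice = [["*"] * n for _ in range(n)]
--     index = {}
--     for i, s in enumerate(sommets):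
--         index[s[0]] = index.get(s[0], []) + [i]
--     for j, t in enumerate(sommets):
--         for ch in t[2:]:
--             for i in index.get(ch, []):
--                 matrice[i][j] = sommets[i][1]
--     return matrice
-- ===== Notes on version B (the rewrite author's own statement) =====
-- stated objective: faster
-- what changed: Instead of testing membership sommets[i][0] in sommet[2:] for every (row,column) pair, B initialises an all-'*' n x n matrix, builds an inverted index from first character to row indices once, and fills cells by walking each column's neighbour characters, so the per-cell substring scan disappears.
import Mathlib
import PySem

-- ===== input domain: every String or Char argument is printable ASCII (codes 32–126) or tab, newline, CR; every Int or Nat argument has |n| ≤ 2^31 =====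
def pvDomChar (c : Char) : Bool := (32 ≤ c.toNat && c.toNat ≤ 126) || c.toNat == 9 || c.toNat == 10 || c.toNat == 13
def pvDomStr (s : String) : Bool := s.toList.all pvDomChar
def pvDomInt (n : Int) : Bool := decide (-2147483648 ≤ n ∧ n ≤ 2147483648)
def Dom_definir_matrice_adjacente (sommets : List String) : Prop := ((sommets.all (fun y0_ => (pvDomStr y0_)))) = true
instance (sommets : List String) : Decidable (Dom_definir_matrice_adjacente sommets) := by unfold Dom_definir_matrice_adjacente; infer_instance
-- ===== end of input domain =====

-- B replaces A's per-cell substring test by an all-'*' matrix filled through an inverted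
-- index from first characters to row indices (objective: faster).

-- ===== PORT A =====
-- shared accessors: s[0] (a Char) and s[1] (a one-char String); the defaults are only
-- reachable on strings too short, i.e. outside Pre_ (where the Python raises IndexError)
def pvHeadC (s : String) : Char := (PySem.Str.pyGet? s 0).getD ' '
def pvSecond (s : String) : String := ((PySem.Str.pyGet? s 1).map (fun c => String.singleton c)).getD ""

def definir_matrice_adjacente (sommets : List String) : List (List String) :=
  (PySem.List.pyRange 0 (sommets.length : Int) 1).foldl (fun matrice i =>
    let si := PySem.List.pyGetD sommets i ""
    let ligne := sommets.foldl (fun ligne sommet =>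
      if PySem.Str.isIn (String.singleton (pvHeadC si)) (PySem.Str.slice sommet (some 2) none)
      then ligne ++ [pvSecond si]
      else ligne ++ ["*"]) []
    matrice ++ [ligne]) []

-- ===== PORT B =====
-- index[s[0]] = index.get(s[0], []) + [i]  (keys are the single characters s[0])
def pvIndex (sommets : List String) : PySem.Dict Char (List Int) :=
  (PySem.List.enumerate sommets 0).foldl
    (fun d p => d.insert (pvHeadC p.2) (d.getD (pvHeadC p.2) [] ++ [p.1])) PySem.Dict.empty

-- matrice[i][j] = v  (row fetched, updated at j, written back at i)
def pvSetEntry (m : List (List String)) (i j : Int) (v : String) : List (List String) :=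
  PySem.List.pySetD m i (PySem.List.pySetD (PySem.List.pyGetD m i []) j v)

def definir_matrice_adjacente_alt (sommets : List String) : List (List String) :=
  let n := sommets.length
  let matrice := (PySem.List.pyRange 0 (n : Int) 1).map (fun _ => PySem.List.pyRepeat ["*"] (n : Int))
  let index := pvIndex sommets
  (PySem.List.enumerate sommets 0).foldl
    (fun m p =>
      (PySem.Str.slice p.2 (some 2) none).toList.foldl
        (fun m ch =>
          (index.getD ch []).foldl
            (fun m i => pvSetEntry m i p.1 (pvSecond (PySem.List.pyGetD sommets i ""))) m) m)
    matrice

-- ===== PRECONDITION & SPEC =====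
-- Pre_ excludes exactly the inputs where the Python A raises IndexError: an empty string
-- (sommets[i][0]) or a length-1 string whose first character occurs in some sommet[2:]
-- (sommets[i][1]); on every other input A returns normally.
def Pre_definir_matrice_adjacente (sommets : List String) : Prop :=
  ∀ s ∈ sommets, s.toList ≠ [] ∧
    ((∃ t ∈ sommets, s.toList.headI ∈ t.toList.drop 2) → 2 ≤ s.toList.length)
instance (sommets : List String) : Decidable (Pre_definir_matrice_adjacente sommets) := by
  unfold Pre_definir_matrice_adjacente; infer_instance

def pvWitness_definir_matrice_adjacente : List String := ["abc", "ba", "c*ab"]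

def Spec_definir_matrice_adjacente (sommets : List String) (out : List (List String)) : Prop := out = definir_matrice_adjacente_alt sommets
instance (sommets : List String) (out : List (List String)) : Decidable (Spec_definir_matrice_adjacente sommets out) := by unfold Spec_definir_matrice_adjacente; infer_instance

-- ===== CLAIM (what is proved, stated in full; the proofs are below) =====
def Claim_equal_definir_matrice_adjacente : Prop := ∀ (sommets : List String), Dom_definir_matrice_adjacente sommets → Pre_definir_matrice_adjacente sommets → Spec_definir_matrice_adjacente sommets (definir_matrice_adjacente sommets)

-- ===== LEMMAS AND PROOFS =====

-- the value both ports compute: entry (i, j) is sommets[i][1] when sommets[i][0]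
-- occurs in sommets[j][2:], and "*" otherwise
def pvSpec (xs : List String) : List (List String) :=
  xs.map (fun s => xs.map (fun t => if pvHeadC s ∈ t.toList.drop 2 then pvSecond s else "*"))

def pvEntry (m : List (List String)) (a b : Nat) : String := (m.getD a []).getD b ""

def pvShape (n : Nat) (m : List (List String)) : Prop := m.length = n ∧ ∀ r ∈ m, r.length = n

lemma pv_isIn_singleton (c : Char) (t : String) :
    PySem.Str.isIn (String.singleton c) (PySem.Str.slice t (some 2) none) = true
      ↔ c ∈ t.toList.drop 2 := by
  rw [PySem.Str.isIn_iff_infix]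
  simp [pysem, List.singleton_infix_iff]

lemma pv_slice2_list (l : List Char) : PySem.List.slice l (some 2) none = l.drop 2 := by
  rw [PySem.List.slice_from l (a := 2) (by norm_num)]
  rfl

lemma row_eq (s : String) (xs : List String) :
    xs.foldl (fun ligne sommet =>
      if PySem.Str.isIn (String.singleton (pvHeadC s)) (PySem.Str.slice sommet (some 2) none)
      then ligne ++ [pvSecond s] else ligne ++ ["*"]) []
    = xs.map (fun t => if pvHeadC s ∈ t.toList.drop 2 then pvSecond s else "*") := by
  have h : (fun (ligne : List String) sommet =>
      if PySem.Str.isIn (String.singleton (pvHeadC s)) (PySem.Str.slice sommet (some 2) none)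
      then ligne ++ [pvSecond s] else ligne ++ ["*"])
      = fun ligne t => ligne ++ [if pvHeadC s ∈ t.toList.drop 2 then pvSecond s else "*"] := by
    funext ligne t
    by_cases h : pvHeadC s ∈ t.toList.drop 2
    · rw [if_pos ((pv_isIn_singleton _ _).2 h), if_pos h]
    · rw [if_neg (fun hb => h ((pv_isIn_singleton _ _).1 hb)), if_neg h]
  rw [h, PySem.List.foldl_append_singleton_eq_map]
  simp

lemma portA_eq_spec (xs : List String) : definir_matrice_adjacente xs = pvSpec xs := by
  unfold definir_matrice_adjacente pvSpec
  simp only [row_eq]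
  rw [PySem.List.foldl_append_singleton_eq_map
    (fun i => xs.map (fun t => if pvHeadC (PySem.List.pyGetD xs i "") ∈ t.toList.drop 2
        then pvSecond (PySem.List.pyGetD xs i "") else "*"))]
  rw [show (fun i => xs.map (fun t => if pvHeadC (PySem.List.pyGetD xs i "") ∈ t.toList.drop 2
        then pvSecond (PySem.List.pyGetD xs i "") else "*"))
      = (fun s => xs.map (fun t => if pvHeadC s ∈ t.toList.drop 2 then pvSecond s else "*"))
          ∘ (fun i => PySem.List.pyGetD xs i "") from rfl]
  rw [← List.map_map, PySem.List.map_pyGetD_pyRange_zero']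
  simp

lemma pvIndex_aux (xs : List String) : ∀ (s : Int) (d : PySem.Dict Char (List Int)) (ch : Char),
    ((PySem.List.enumerate xs s).foldl
      (fun d p => d.insert (pvHeadC p.2) (d.getD (pvHeadC p.2) [] ++ [p.1])) d).getD ch []
    = d.getD ch [] ++ ((PySem.List.enumerate xs s).filter (fun p => pvHeadC p.2 == ch)).map (·.1) := by
  induction xs with
  | nil => intro s d ch; simp [PySem.List.enumerate_nil]
  | cons x xs ih =>
    intro s d ch
    rw [PySem.List.enumerate_cons]
    simp only [List.foldl_cons, List.filter_cons]
    rw [ih]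
    by_cases h : pvHeadC x = ch
    · simp [h]
    · simp [h, PySem.Dict.getD_insert, Ne.symm h]

lemma mem_pvIndex (xs : List String) (ch : Char) (i : Int) :
    i ∈ (pvIndex xs).getD ch [] ↔
      ∃ k : Nat, ∃ hk : k < xs.length, i = (k : Int) ∧ pvHeadC xs[k] = ch := by
  unfold pvIndex
  rw [pvIndex_aux]
  simp only [PySem.Dict.getD_empty, List.nil_append, List.mem_map, List.mem_filter]
  constructor
  · rintro ⟨p, ⟨hp, hf⟩, rfl⟩
    rw [PySem.List.mem_enumerate_iff] at hp
    obtain ⟨k, hk, rfl⟩ := hp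
    exact ⟨k, hk, by simp, by simpa using hf⟩
  · rintro ⟨k, hk, rfl, hch⟩
    refine ⟨((k:Int), xs[k]), ⟨?_, by simpa using hch⟩, rfl⟩
    rw [PySem.List.mem_enumerate_iff]
    exact ⟨k, hk, by simp⟩

lemma pvShape_setEntry {n : Nat} {m : List (List String)} (hm : pvShape n m)
    (k jk : Nat) (hk : k < n) (v : String) : pvShape n (pvSetEntry m (k:Int) (jk:Int) v) := by
  obtain ⟨h1, h2⟩ := hm
  have hkm : k < m.length := by omega
  unfold pvSetEntry
  simp only [PySem.List.pySetD_natCast, PySem.List.pyGetD_natCast]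
  refine ⟨by simpa using h1, ?_⟩
  intro r hr
  rcases List.mem_or_eq_of_mem_set hr with h | h
  · exact h2 r h
  · subst h
    rw [List.length_set, List.getD_eq_getElem _ _ hkm]
    exact h2 _ (List.getElem_mem hkm)

lemma pvEntry_setEntry {n : Nat} {m : List (List String)} (hm : pvShape n m)
    (k jk : Nat) (hk : k < n) (hj : jk < n) (v : String) (a b : Nat) :
    pvEntry (pvSetEntry m (k:Int) (jk:Int) v) a b
      = if a = k ∧ b = jk then v else pvEntry m a b := by
  obtain ⟨h1, h2⟩ := hm
  have hkm : k < m.length := by omega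
  have hrow : (m.getD k []).length = n := by
    rw [List.getD_eq_getElem _ _ hkm]; exact h2 _ (List.getElem_mem hkm)
  unfold pvSetEntry pvEntry
  simp only [PySem.List.pySetD_natCast, PySem.List.pyGetD_natCast]
  rcases eq_or_ne a k with rfl | ha
  · have ho : (m.set a ((m.getD a []).set jk v)).getD a [] = (m.getD a []).set jk v := by
      rw [List.getD_eq_getElem _ _ (by simpa using hkm), List.getElem_set_self]
    rw [ho]
    rcases eq_or_ne b jk with rfl | hb
    · rw [if_pos ⟨rfl, rfl⟩, List.getD_eq_getElem _ _ (by rw [List.length_set, hrow]; omega),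
        List.getElem_set_self]
    · rw [if_neg (by tauto)]
      simp only [List.getD_eq_getElem?_getD]
      rw [List.getElem?_set_ne (Ne.symm hb)]
  · rw [if_neg (by tauto)]
    have ho : (m.set k ((m.getD k []).set jk v)).getD a [] = m.getD a [] := by
      simp only [List.getD_eq_getElem?_getD]
      rw [List.getElem?_set_ne (Ne.symm ha)]
    rw [ho]

lemma pv_fill_list (xs : List String) (jk : Nat) (hj : jk < xs.length) (v : String → String)
    (I : List Int) (hI : ∀ i ∈ I, ∃ k : Nat, k < xs.length ∧ i = (k : Int)) :
    ∀ m, pvShape xs.length m →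
      pvShape xs.length (I.foldl (fun m i => pvSetEntry m i (jk : Int) (v (PySem.List.pyGetD xs i ""))) m) ∧
      ∀ a b : Nat,
        pvEntry (I.foldl (fun m i => pvSetEntry m i (jk : Int) (v (PySem.List.pyGetD xs i ""))) m) a b
          = if b = jk ∧ (a : Int) ∈ I then v (xs.getD a "") else pvEntry m a b := by
  induction I with
  | nil => intro m hm; exact ⟨hm, fun a b => by simp⟩
  | cons i I ih =>
    intro m hm
    obtain ⟨k, hk, rfl⟩ := hI i (List.mem_cons_self ..)
    have hI' : ∀ i ∈ I, ∃ k : Nat, k < xs.length ∧ i = (k : Int) :=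
      fun i hi => hI i (List.mem_cons_of_mem _ hi)
    simp only [List.foldl_cons]
    have hm' := pvShape_setEntry hm k jk hk (v (PySem.List.pyGetD xs (k:Int) ""))
    obtain ⟨hs, he⟩ := ih hI' _ hm'
    refine ⟨hs, fun a b => ?_⟩
    rw [he a b, pvEntry_setEntry hm k jk hk hj]
    simp only [PySem.List.pyGetD_natCast]
    by_cases hb : b = jk
    · subst hb
      by_cases haI : (a : Int) ∈ I
      · simp [haI]
      · by_cases hak : a = k
        · subst hak; simp
        · have : (a : Int) ≠ (k : Int) := by exact_mod_cast hak
          simp [haI, hak, this]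
    · simp [hb]

lemma pv_fill_col (xs : List String) (jk : Nat) (hj : jk < xs.length) (L : List Char) :
    ∀ m, pvShape xs.length m →
      pvShape xs.length (L.foldl (fun m ch =>
          ((pvIndex xs).getD ch []).foldl
            (fun m i => pvSetEntry m i (jk : Int) (pvSecond (PySem.List.pyGetD xs i ""))) m) m) ∧
      ∀ a b : Nat,
        pvEntry (L.foldl (fun m ch =>
          ((pvIndex xs).getD ch []).foldl
            (fun m i => pvSetEntry m i (jk : Int) (pvSecond (PySem.List.pyGetD xs i ""))) m) m) a b
          = if b = jk ∧ a < xs.length ∧ pvHeadC (xs.getD a "") ∈ L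
            then pvSecond (xs.getD a "") else pvEntry m a b := by
  induction L with
  | nil => intro m hm; exact ⟨hm, fun a b => by simp⟩
  | cons ch L ih =>
    intro m hm
    have hI : ∀ i ∈ (pvIndex xs).getD ch [], ∃ k : Nat, k < xs.length ∧ i = (k : Int) := by
      intro i hi
      obtain ⟨k, hk, rfl, _⟩ := (mem_pvIndex xs ch i).1 hi
      exact ⟨k, hk, rfl⟩
    simp only [List.foldl_cons]
    obtain ⟨hs1, he1⟩ := pv_fill_list xs jk hj pvSecond _ hI m hm
    obtain ⟨hs, he⟩ := ih _ hs1
    refine ⟨hs, fun a b => ?_⟩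
    rw [he a b, he1 a b]
    have hmem : ((a : Int) ∈ (pvIndex xs).getD ch []) ↔ (a < xs.length ∧ pvHeadC (xs.getD a "") = ch) := by
      rw [mem_pvIndex]
      constructor
      · rintro ⟨k, hk, hak, hch⟩
        have : a = k := by exact_mod_cast hak
        subst this
        exact ⟨hk, by rwa [List.getD_eq_getElem _ _ hk]⟩
      · rintro ⟨ha, hch⟩
        exact ⟨a, ha, rfl, by rwa [List.getD_eq_getElem _ _ ha] at hch⟩
    by_cases hb : b = jk
    · subst hb
      by_cases ha : a < xs.length
      · have hg : xs.getD a "" = xs[a] := List.getD_eq_getElem _ _ ha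
        rw [hg] at hmem ⊢
        by_cases hch : pvHeadC xs[a] = ch <;> by_cases hL : pvHeadC xs[a] ∈ L <;>
          simp [hmem, hch, hL, ha, List.mem_cons]
      · have hni : ¬ ((a:Int) ∈ (pvIndex xs).getD ch []) := fun h => ha (hmem.1 h).1
        simp [ha, hni]
    · simp [hb]

lemma pv_fill_all (xs : List String) :
    ∀ (ys : List String) (s : Nat), s + ys.length ≤ xs.length →
    ∀ m, pvShape xs.length m →
      pvShape xs.length ((PySem.List.enumerate ys (s : Int)).foldl
        (fun m p => (PySem.Str.slice p.2 (some 2) none).toList.foldl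
          (fun m ch => ((pvIndex xs).getD ch []).foldl
            (fun m i => pvSetEntry m i p.1 (pvSecond (PySem.List.pyGetD xs i ""))) m) m) m) ∧
      ∀ a b : Nat,
        pvEntry ((PySem.List.enumerate ys (s : Int)).foldl
          (fun m p => (PySem.Str.slice p.2 (some 2) none).toList.foldl
            (fun m ch => ((pvIndex xs).getD ch []).foldl
              (fun m i => pvSetEntry m i p.1 (pvSecond (PySem.List.pyGetD xs i ""))) m) m) m) a b
        = if a < xs.length ∧ s ≤ b ∧ b < s + ys.length ∧
              pvHeadC (xs.getD a "") ∈ ((ys.getD (b - s) "").toList.drop 2)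
          then pvSecond (xs.getD a "") else pvEntry m a b := by
  intro ys
  induction ys with
  | nil =>
    intro s hs m hm
    refine ⟨by simpa [PySem.List.enumerate_nil] using hm, fun a b => ?_⟩
    rw [PySem.List.enumerate_nil]
    simp only [List.foldl_nil, List.length_nil]
    rw [if_neg (by rintro ⟨-, h1, h2, -⟩; omega)]
  | cons t ys ih =>
    intro s hs m hm
    rw [PySem.List.enumerate_cons]
    simp only [List.foldl_cons]
    have hjs : s < xs.length := by simp at hs; omega
    obtain ⟨hs1, he1⟩ := pv_fill_col xs s hjs (PySem.Str.slice t (some 2) none).toList m hm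
    have hcast : (s : Int) + 1 = ((s + 1 : Nat) : Int) := by push_cast; ring
    rw [hcast]
    obtain ⟨hsh, he⟩ := ih (s + 1) (by simp at hs ⊢; omega) _ hs1
    refine ⟨hsh, fun a b => ?_⟩
    rw [he a b, he1 a b]
    simp only [List.length_cons]
    by_cases hbs : b = s
    · subst hbs
      rw [if_neg (by rintro ⟨-, h1, -⟩; omega)]
      simp [pv_slice2_list, show b < b + (ys.length + 1) from by omega]
    · by_cases hin : s + 1 ≤ b ∧ b < s + 1 + ys.length
      · have e : b - s = (b - (s + 1)) + 1 := by omega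
        rw [e]
        simp only [List.getD_cons_succ]
        simp [hbs, hin.1, hin.2, show s ≤ b from by omega,
          show b < s + (ys.length + 1) from by omega]
      · rw [if_neg (by rintro ⟨-, h1, h2, -⟩; omega), if_neg (by rintro ⟨h1, -⟩; exact hbs h1),
          if_neg (by rintro ⟨-, h1, h2, -⟩; omega)]

lemma portB_eq_spec (xs : List String) : definir_matrice_adjacente_alt xs = pvSpec xs := by
  unfold definir_matrice_adjacente_alt
  simp only []
  have hrep : (PySem.List.pyRange 0 (xs.length : Int) 1).map
      (fun _ => PySem.List.pyRepeat ["*"] (xs.length : Int))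
      = List.replicate xs.length (List.replicate xs.length "*") := by
    rw [PySem.List.pyRepeat_singleton]
    apply List.eq_replicate_iff.mpr
    constructor
    · simp [PySem.List.length_pyRange_one]
    · intro r hr
      rcases List.mem_map.1 hr with ⟨_, _, rfl⟩
      simp
  rw [hrep]
  have hshape0 : pvShape xs.length (List.replicate xs.length (List.replicate xs.length "*")) :=
    ⟨by simp, by intro r hr; rw [List.eq_of_mem_replicate hr]; simp⟩
  have h0 : ((0 : Nat) : Int) = (0 : Int) := by simp
  obtain ⟨hsh, he⟩ := pv_fill_all xs xs 0 (by omega) _ hshape0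
  rw [h0] at hsh he
  set F := (PySem.List.enumerate xs 0).foldl
      (fun m p => (PySem.Str.slice p.2 (some 2) none).toList.foldl
        (fun m ch => ((pvIndex xs).getD ch []).foldl
          (fun m i => pvSetEntry m i p.1 (pvSecond (PySem.List.pyGetD xs i ""))) m) m)
      (List.replicate xs.length (List.replicate xs.length "*")) with hF
  have hlen : F.length = xs.length := hsh.1
  apply List.ext_getElem (by simp [hlen, pvSpec])
  intro a ha1 ha2
  have ha : a < xs.length := by simpa [hlen] using ha1
  have hrowlen : F[a].length = xs.length := hsh.2 _ (List.getElem_mem ha1)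
  have hspecrow : (pvSpec xs)[a] = xs.map (fun t =>
      if pvHeadC xs[a] ∈ t.toList.drop 2 then pvSecond xs[a] else "*") := by
    simp [pvSpec]
  apply List.ext_getElem (by simp [hrowlen, hspecrow])
  intro b hb1 hb2
  have hb : b < xs.length := by simpa [hrowlen] using hb1
  have hEF : F[a][b] = pvEntry F a b := by
    unfold pvEntry
    rw [List.getD_eq_getElem _ _ (by omega : a < F.length),
      List.getD_eq_getElem _ _ (by omega : b < F[a].length)]
  rw [hEF, he a b]
  have hga : xs.getD a "" = xs[a] := List.getD_eq_getElem _ _ ha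
  have hgb : xs.getD b "" = xs[b] := List.getD_eq_getElem _ _ hb
  simp only [Nat.zero_add, Nat.sub_zero, Nat.zero_le, hga, hgb, ha, hb, true_and]
  have hrow0 : (List.replicate xs.length (List.replicate xs.length "*")).getD a []
      = List.replicate xs.length "*" := by
    rw [List.getD_eq_getElem _ _ (by simpa using ha), List.getElem_replicate]
  have hentry0 : pvEntry (List.replicate xs.length (List.replicate xs.length "*")) a b = "*" := by
    unfold pvEntry
    rw [hrow0, List.getD_eq_getElem _ _ (by simpa using hb), List.getElem_replicate]
  rw [hentry0]
  simp [pvSpec]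

-- ===== VERDICT (by name: the statement is the Claim_ definition above) =====
theorem definir_matrice_adjacente_spec : Claim_equal_definir_matrice_adjacente := by
  intro sommets _ _
  unfold Spec_definir_matrice_adjacente
  rw [portA_eq_spec, portB_eq_spec]
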